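-- pv_equiv track=rewrite | github.com/MUSTAFA892/LeetCode-and-Other-Coding-Problems | 3917. Count Indices With Opposite Parity/main.py | countOppositeParity
-- ===== SOURCE A (Python) =====
-- def countOppositeParity(nums: list[int]) -> list[int]:
--
--     e , o = 0 , 0
--
--     for i in range(len(nums)-1, -1, -1):
--         if nums[i] % 2 == 0:
--             nums[i] = o
--             e += 1
--
--         else:
--             nums[i] = e
--             o += 1
--
--     return nums
-- ===== SOURCE B (Python) =====
-- def countOppositeParity(nums: list[int]) -> list[int]:
--     E = sum(1 for x in nums if x % 2 == 0)
--     O = len(nums) - E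
--     evens_seen, odds_seen = 0, 0
--     for i in range(len(nums)):
--         if nums[i] % 2 == 0:
--             nums[i] = O - odds_seen
--             evens_seen += 1
--         else:
--             nums[i] = E - evens_seen
--             odds_seen += 1
--     return nums
-- ===== Notes on version B (the rewrite author's own statement) =====
-- stated objective: alternative
-- what changed: A walks backward accumulating suffix parity counters; B precomputes total even/odd counts in one pass and then walks forward with prefix seen-counters, writing total-minus-seen; it mutates nums in place like A.
import Mathlib
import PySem

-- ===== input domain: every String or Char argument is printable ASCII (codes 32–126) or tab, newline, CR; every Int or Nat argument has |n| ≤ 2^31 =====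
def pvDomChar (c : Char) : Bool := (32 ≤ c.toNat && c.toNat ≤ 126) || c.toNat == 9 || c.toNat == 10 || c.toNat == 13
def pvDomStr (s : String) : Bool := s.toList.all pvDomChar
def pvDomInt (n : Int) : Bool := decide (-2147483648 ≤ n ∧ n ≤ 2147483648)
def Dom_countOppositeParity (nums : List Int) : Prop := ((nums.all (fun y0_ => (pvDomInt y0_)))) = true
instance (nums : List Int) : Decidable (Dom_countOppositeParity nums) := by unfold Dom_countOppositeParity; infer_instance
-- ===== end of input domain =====

-- B replaces A's backward suffix-counter sweep with a totals-then-forward-prefix pass (alternative decomposition);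
-- both Pythons overwrite nums in place and return it — the equivalence proved here is about the return value.

-- ===== PORT A =====
-- A's backward loop: process the last index first; state (e, o, rewritten suffix).
def aGo : List Int → Int × Int × List Int
  | [] => (0, 0, [])
  | x :: xs =>
    let (e, o, res) := aGo xs
    if PySem.Int.mod x 2 == 0 then (e + 1, o, o :: res) else (e, o + 1, e :: res)

def countOppositeParity (nums : List Int) : List Int := (aGo nums).2.2

-- ===== PORT B =====
def bGo (E O : Int) : List Int → Int → Int → List Int
  | [], _, _ => []
  | x :: xs, es, os =>
    if PySem.Int.mod x 2 == 0 then (O - os) :: bGo E O xs (es + 1) os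
    else (E - es) :: bGo E O xs es (os + 1)

def countOppositeParity_alt (nums : List Int) : List Int :=
  let E : Int := ((nums.filter (fun x => PySem.Int.mod x 2 == 0)).length : Int)
  let O : Int := (nums.length : Int) - E
  bGo E O nums 0 0

-- ===== PRECONDITION & SPEC =====
def Spec_countOppositeParity (nums : List Int) (out : List Int) : Prop := out = countOppositeParity_alt nums
instance (nums : List Int) (out : List Int) : Decidable (Spec_countOppositeParity nums out) := by unfold Spec_countOppositeParity; infer_instance

-- ===== CLAIM (what is proved, stated in full; the proofs are below) =====
def Claim_equal_countOppositeParity : Prop := ∀ (nums : List Int), Dom_countOppositeParity nums → Spec_countOppositeParity nums (countOppositeParity nums)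

-- ===== LEMMAS AND PROOFS =====

-- the accumulated counters of A equal the even/odd counts of the list
theorem aGo_counts (xs : List Int) :
    (aGo xs).1 = ((xs.filter (fun x => PySem.Int.mod x 2 == 0)).length : Int) ∧
    (aGo xs).2.1 = ((xs.filter (fun x => !(PySem.Int.mod x 2 == 0))).length : Int) := by
  induction xs with
  | nil => simp [aGo]
  | cons x xs ih =>
    simp only [aGo, List.filter_cons]
    rcases h : (PySem.Int.mod x 2 == 0) with _ | _ <;> simp_all

theorem bGo_eq_aGo (xs : List Int) : ∀ (es os E O : Int),
    E = es + ((xs.filter (fun x => PySem.Int.mod x 2 == 0)).length : Int) →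
    O = os + ((xs.filter (fun x => !(PySem.Int.mod x 2 == 0))).length : Int) →
    bGo E O xs es os = (aGo xs).2.2 := by
  induction xs with
  | nil => intro es os E O _ _; simp [bGo, aGo]
  | cons x xs ih =>
    intro es os E O hE hO
    obtain ⟨hce, hco⟩ := aGo_counts xs
    rcases hg : aGo xs with ⟨e, o, res⟩
    rw [hg] at hce hco
    simp only at hce hco
    simp only [List.filter_cons] at hE hO
    rcases h : (PySem.Int.mod x 2 == 0) with _ | _
    · -- x odd: A prepends e, B prepends E - es
      rw [h] at hE hO
      simp only [Bool.not_false] at hO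
      rw [if_neg Bool.false_ne_true] at hE
      rw [if_pos trivial] at hO
      simp only [bGo, aGo, hg]
      rw [h, if_neg Bool.false_ne_true, if_neg Bool.false_ne_true]
      push_cast [List.length_cons] at hE hO hce hco
      refine List.cons_eq_cons.mpr ⟨by omega, ?_⟩
      have hr := ih es (os + 1) E O (by omega) (by omega)
      rw [hg] at hr
      exact hr
    · -- x even: A prepends o, B prepends O - os
      rw [h] at hE hO
      simp only [Bool.not_true] at hO
      rw [if_pos rfl] at hE
      rw [if_neg Bool.false_ne_true] at hO
      simp only [bGo, aGo, hg]
      rw [h, if_pos rfl, if_pos rfl]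
      push_cast [List.length_cons] at hE hO hce hco
      refine List.cons_eq_cons.mpr ⟨by omega, ?_⟩
      have hr := ih (es + 1) os E O (by omega) (by omega)
      rw [hg] at hr
      exact hr

-- ===== VERDICT (by name: the statement is the Claim_ definition above) =====
theorem countOppositeParity_spec : Claim_equal_countOppositeParity := by
  intro nums _
  unfold Spec_countOppositeParity countOppositeParity countOppositeParity_alt
  refine (bGo_eq_aGo nums 0 0 _ _ (by ring_nf) ?_).symm
  have h := List.length_eq_length_filter_add (l := nums) (f := fun x => PySem.Int.mod x 2 == 0)
  omega
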